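-- pv_equiv track=rewrite | github.com/PushkarPrabhath27/ResearchCrossPollinationEngine | hypothesis-engine/src/agents/resource_agent.py | _parse_funding
-- ===== SOURCE A (Python) =====
-- from typing import List, Dict, Optional
--
-- def _parse_funding(text: str) -> List[Dict]:
--     """Parse funding information from text"""
--     opportunities = []
--     lines = text.split('\n')
--
--     current_opp = {}
--     for line in lines:
--         line = line.strip()
--
--         if 'agency:' in line.lower() or 'program:' in line.lower():
--             if current_opp and 'agency' in current_opp:
--                 opportunities.append(current_opp)
--                 current_opp = {}
--
--         if 'agency:' in line.lower():
--             current_opp['agency'] = line.split(':', 1)[-1].strip()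
--         elif 'program:' in line.lower():
--             current_opp['program'] = line.split(':', 1)[-1].strip()
--         elif 'amount:' in line.lower():
--             current_opp['amount'] = line.split(':', 1)[-1].strip()
--         elif 'url:' in line.lower() or 'website:' in line.lower():
--             current_opp['url'] = line.split(':', 1)[-1].strip()
--
--     if current_opp:
--         opportunities.append(current_opp)
--
--     return opportunities[:8]
-- ===== SOURCE B (Python) =====
-- from typing import List, Dict, Optional
--
-- _KEYWORDS = {'agency:': 'agency', 'program:': 'program', 'amount:': 'amount',
--              'url:': 'url', 'website:': 'url'}
--
-- def _classify(line: str) -> Optional[tuple]: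
--     """Lex one stripped line into a (field, value) token, or None if no keyword occurs."""
--     line = line.strip()
--     low = line.lower()
--     for kw in ('agency:', 'program:', 'amount:', 'url:', 'website:'):
--         if kw in low:
--             return (_KEYWORDS[kw], line.split(':', 1)[-1].strip())
--     return None
--
-- def _split_first(tokens: list) -> int:
--     """Length of the leading opportunity group: it ends just before the first
--     agency/program token that follows an agency token."""
--     seen = False
--     i = 0
--     while i < len(tokens):
--         f = tokens[i][0]
--         if seen and f in ('agency', 'program'):
--             break
--         seen = seen or f == 'agency'
--         i += 1
--     return i
--
-- def _groups(tokens: list) -> list: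
--     """Peel off one opportunity group at a time."""
--     out = []
--     while tokens:
--         i = _split_first(tokens)
--         out.append(tokens[:i])
--         tokens = tokens[i:]
--     return out
--
-- def _parse_funding(text: str) -> List[Dict]:
--     """Parse funding information from text"""
--     tokens = [t for t in (_classify(l) for l in text.split('\n')) if t is not None]
--     return [dict(g) for g in _groups(tokens)][:8]
-- ===== Notes on version B (the rewrite author's own statement) =====
-- stated objective: alternative
-- what changed: Replaces A's single stateful loop (classify each line and flush/extend a current dict inline) by a staged pipeline: lex lines into (field, value) tokens via a keyword table, then a recursive-descent splitter that peels off one opportunity group at a time (a group ends just before the first agency/program token following an agency token) and builds each dict per group.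
import Mathlib
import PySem

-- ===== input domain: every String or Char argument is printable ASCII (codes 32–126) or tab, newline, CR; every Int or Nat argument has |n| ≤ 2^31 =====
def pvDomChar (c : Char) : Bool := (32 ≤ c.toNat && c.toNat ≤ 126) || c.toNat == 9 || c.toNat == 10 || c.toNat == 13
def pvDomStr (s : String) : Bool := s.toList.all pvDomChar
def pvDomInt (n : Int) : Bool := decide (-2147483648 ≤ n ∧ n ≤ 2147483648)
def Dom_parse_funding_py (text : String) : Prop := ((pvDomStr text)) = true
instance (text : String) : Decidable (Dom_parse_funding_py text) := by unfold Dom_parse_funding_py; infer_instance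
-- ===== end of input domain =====

-- B replaces A's single stateful grouping loop by a recursive-descent splitter: lex the lines
-- into tokens, then recursively peel off one opportunity group at a time (a group ends just
-- before the first agency/program token following an agency token) and build each dict per
-- group; objective: alternative, same return value.

-- ===== PORT A =====
-- shared helper: the Python expression line.split(':', 1)[-1].strip(), appearing verbatim in both programs
def pvTail (l : String) : String :=
  PySem.Str.strip ((PySem.List.pyGet? ((PySem.Str.splitMax? l ":" 1).getD []) (-1)).getD "")

-- the body of A's 'for line in lines' loop, over state (opportunities, current_opp)
def pvStepA (st : List (PySem.Dict String String) × PySem.Dict String String) (line : String) :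
    List (PySem.Dict String String) × PySem.Dict String String :=
  let l := PySem.Str.strip line
  let low := PySem.Str.lower l
  let st1 :=
    if (PySem.Str.isIn "agency:" low || PySem.Str.isIn "program:" low)
        && (!st.2.items.isEmpty && st.2.contains "agency")
    then (st.1 ++ [st.2], PySem.Dict.empty)
    else st
  if PySem.Str.isIn "agency:" low then (st1.1, st1.2.insert "agency" (pvTail l))
  else if PySem.Str.isIn "program:" low then (st1.1, st1.2.insert "program" (pvTail l))
  else if PySem.Str.isIn "amount:" low then (st1.1, st1.2.insert "amount" (pvTail l))
  else if PySem.Str.isIn "url:" low || PySem.Str.isIn "website:" low then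
    (st1.1, st1.2.insert "url" (pvTail l))
  else st1

def parse_funding_py (text : String) : List (List (String × String)) :=
  let lines := (PySem.Str.split? text "\n").getD []   -- sep "\n" ≠ "", so split? is always some
  let fin := lines.foldl pvStepA ([], PySem.Dict.empty)
  let opps := if !fin.2.items.isEmpty then fin.1 ++ [fin.2] else fin.1
  (PySem.List.slice opps none (some 8)).map (·.items)

-- ===== PORT B =====
-- the keyword table _KEYWORDS of Source B
def pvKeywordMap : PySem.Dict String String :=
  PySem.Dict.ofList [("agency:", "agency"), ("program:", "program"),
                     ("amount:", "amount"), ("url:", "url"), ("website:", "url")]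

-- _classify: first keyword (in tuple order) occurring in the lowered line, mapped through _KEYWORDS
def pvClassify (line : String) : Option (String × String) :=
  let l := PySem.Str.strip line
  let low := PySem.Str.lower l
  (["agency:", "program:", "amount:", "url:", "website:"].find?
      (fun kw => PySem.Str.isIn kw low)).map
    (fun kw => ((pvKeywordMap.get? kw).getD "", pvTail l))   -- _KEYWORDS[kw]; key always present

-- _split_first: length of the leading group
def pvSplitFirst (tokens : List (String × String)) (seen : Bool) : Nat :=
  match tokens with
  | [] => 0
  | t :: ts =>
    if seen && (t.1 == "agency" || t.1 == "program") then 0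
    else 1 + pvSplitFirst ts (seen || t.1 == "agency")

theorem pvSplitFirst_cons_false (t : String × String) (ts : List (String × String)) :
    pvSplitFirst (t :: ts) false = pvSplitFirst ts (t.1 == "agency") + 1 := by
  simp [pvSplitFirst, Nat.add_comm]

-- _groups: recursively peel off one group at a time
def pvGroups : List (String × String) → List (List (String × String))
  | [] => []
  | t :: ts =>
    let i := pvSplitFirst (t :: ts) false
    ((t :: ts).take i) :: pvGroups ((t :: ts).drop i)
termination_by tokens => tokens.length
decreasing_by
  simp only [List.length_drop, List.length_cons, pvSplitFirst_cons_false]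
  omega

-- dict(g): build a dict from the pairs of a group
def pvDictOf (g : List (String × String)) : PySem.Dict String String :=
  g.foldl (fun d t => d.insert t.1 t.2) PySem.Dict.empty

def parse_funding_py_alt (text : String) : List (List (String × String)) :=
  let lines := (PySem.Str.split? text "\n").getD []   -- sep "\n" ≠ "", so split? is always some
  let tokens := lines.filterMap pvClassify            -- the filtering comprehension
  PySem.List.slice ((pvGroups tokens).map (fun g => (pvDictOf g).items)) none (some 8)

-- ===== PRECONDITION & SPEC =====
def Spec_parse_funding_py (text : String) (out : List (List (String × String))) : Prop := out = parse_funding_py_alt text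
instance (text : String) (out : List (List (String × String))) : Decidable (Spec_parse_funding_py text out) := by unfold Spec_parse_funding_py; infer_instance

-- ===== CLAIM (what is proved, stated in full; the proofs are below) =====
def Claim_equal_parse_funding_py : Prop := ∀ (text : String), Dom_parse_funding_py text → Spec_parse_funding_py text (parse_funding_py text)

-- ===== LEMMAS AND PROOFS =====

-- A's per-line step, rephrased at token level (proof-only device)
def pvTokStep (st : List (PySem.Dict String String) × PySem.Dict String String)
    (tk : String × String) :
    List (PySem.Dict String String) × PySem.Dict String String :=
  let st1 :=
    if (tk.1 == "agency" || tk.1 == "program") && st.2.contains "agency"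
    then (st.1 ++ [st.2], PySem.Dict.empty)
    else st
  (st1.1, st1.2.insert tk.1 tk.2)

-- a dict containing a key is nonempty
theorem pv_contains_nonempty (d : PySem.Dict String String) (k : String)
    (h : d.contains k = true) : d.items.isEmpty = false := by
  obtain ⟨items⟩ := d
  cases items with
  | nil => simp [PySem.Dict.contains] at h
  | cons a l => rfl

-- the table lookup of pvClassify, written as the equivalent keyword-priority chain
theorem pv_classify_eq (line : String) :
    pvClassify line =
      (let l := PySem.Str.strip line
       let low := PySem.Str.lower l
       if PySem.Str.isIn "agency:" low then some ("agency", pvTail l)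
       else if PySem.Str.isIn "program:" low then some ("program", pvTail l)
       else if PySem.Str.isIn "amount:" low then some ("amount", pvTail l)
       else if PySem.Str.isIn "url:" low || PySem.Str.isIn "website:" low then
         some ("url", pvTail l)
       else none) := by
  unfold pvClassify
  cases ha : PySem.Str.isIn "agency:" (PySem.Str.lower (PySem.Str.strip line)) <;>
  cases hp : PySem.Str.isIn "program:" (PySem.Str.lower (PySem.Str.strip line)) <;>
  cases hm : PySem.Str.isIn "amount:" (PySem.Str.lower (PySem.Str.strip line)) <;>
  cases hu : PySem.Str.isIn "url:" (PySem.Str.lower (PySem.Str.strip line)) <;>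
  cases hw : PySem.Str.isIn "website:" (PySem.Str.lower (PySem.Str.strip line)) <;>
  simp only [List.find?, ha, hp, hm, hu, hw, Bool.or_false, Bool.or_true, Bool.or_self,
    if_true, Option.map_some, Option.map_none] <;> rfl

-- the fused step over abstract keyword booleans
theorem pv_step_core (a p m u w : Bool) (v : String)
    (st : List (PySem.Dict String String) × PySem.Dict String String) :
    (let st1 :=
       if (a || p) && (!st.2.items.isEmpty && st.2.contains "agency")
       then (st.1 ++ [st.2], (PySem.Dict.empty : PySem.Dict String String))
       else st
     if a then (st1.1, st1.2.insert "agency" v)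
     else if p then (st1.1, st1.2.insert "program" v)
     else if m then (st1.1, st1.2.insert "amount" v)
     else if u || w then (st1.1, st1.2.insert "url" v)
     else st1) =
    ((if a then some ("agency", v)
      else if p then some ("program", v)
      else if m then some ("amount", v)
      else if u || w then some ("url", v)
      else none).elim st (pvTokStep st)) := by
  cases hc : st.2.contains "agency" <;>
  cases a <;> cases p <;> cases m <;> cases u <;> cases w <;>
    first
      | simp [pvTokStep, hc, pv_contains_nonempty _ _ hc]
      | simp [pvTokStep, hc]

-- one line of A's loop = classify-then-feed-the-token
theorem pv_step_eq (st : List (PySem.Dict String String) × PySem.Dict String String)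
    (line : String) :
    pvStepA st line = (pvClassify line).elim st (pvTokStep st) := by
  rw [pv_classify_eq]
  exact pv_step_core
    (PySem.Str.isIn "agency:" (PySem.Str.lower (PySem.Str.strip line)))
    (PySem.Str.isIn "program:" (PySem.Str.lower (PySem.Str.strip line)))
    (PySem.Str.isIn "amount:" (PySem.Str.lower (PySem.Str.strip line)))
    (PySem.Str.isIn "url:" (PySem.Str.lower (PySem.Str.strip line)))
    (PySem.Str.isIn "website:" (PySem.Str.lower (PySem.Str.strip line)))
    (pvTail (PySem.Str.strip line)) st

-- the fused fold over lines equals the token-level fold over the lexed stream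
theorem pv_fold_eq (lines : List String)
    (st : List (PySem.Dict String String) × PySem.Dict String String) :
    lines.foldl pvStepA st = (lines.filterMap pvClassify).foldl pvTokStep st := by
  induction lines generalizing st with
  | nil => rfl
  | cons l ls ih =>
    rw [List.foldl_cons, List.filterMap_cons, pv_step_eq st l]
    cases hc : pvClassify l with
    | none => simp [ih]
    | some t => simp [ih]

-- dict building over an appended token
theorem pv_dictOf_append (cur : List (String × String)) (t : String × String) :
    pvDictOf (cur ++ [t]) = (pvDictOf cur).insert t.1 t.2 := by
  simp [pvDictOf]

-- membership in the built dict = a token with that key occurs in the group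
theorem pv_contains_dictOf (g : List (String × String)) (k : String) :
    (pvDictOf g).contains k = g.any (fun t => t.1 == k) := by
  suffices h : ∀ (d : PySem.Dict String String),
      (g.foldl (fun d t => d.insert t.1 t.2) d).contains k
        = (d.contains k || g.any (fun t => t.1 == k)) by
    simpa [pvDictOf] using h PySem.Dict.empty
  induction g with
  | nil => simp
  | cons t ts ih =>
    intro d
    simp only [List.foldl_cons, List.any_cons, ih, PySem.Dict.contains_insert]
    cases h : (k == t.1) <;> cases h2 : (t.1 == k) <;>
      simp_all [BEq.comm]

-- the dict of a nonempty group is nonempty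
theorem pv_dictOf_ne_nil (t : String × String) (g : List (String × String)) :
    ((pvDictOf (t :: g)).items.isEmpty) = false := by
  apply pv_contains_nonempty _ t.1
  simp [pv_contains_dictOf]

-- pvGroups, unfolded one step
theorem pv_groups_cons (t : String × String) (ts : List (String × String)) :
    pvGroups (t :: ts)
      = (t :: ts.take (pvSplitFirst ts (t.1 == "agency")))
        :: pvGroups (ts.drop (pvSplitFirst ts (t.1 == "agency"))) := by
  rw [pvGroups]
  simp [pvSplitFirst_cons_false]

-- A's finalization
def pvFin (st : List (PySem.Dict String String) × PySem.Dict String String) :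
    List (PySem.Dict String String) :=
  if !st.2.items.isEmpty then st.1 ++ [st.2] else st.1

-- main invariant: the token fold, continued from a nonempty current group, yields exactly
-- the recursive-descent grouping
theorem pv_main (ts : List (String × String)) :
    ∀ (cur : List (String × String)) (opps : List (PySem.Dict String String)),
      cur ≠ [] →
      pvFin (ts.foldl pvTokStep (opps, pvDictOf cur)) =
        opps ++ pvDictOf (cur ++ ts.take (pvSplitFirst ts (cur.any (fun t => t.1 == "agency"))))
          :: (pvGroups (ts.drop (pvSplitFirst ts (cur.any (fun t => t.1 == "agency"))))).map pvDictOf := by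
  induction ts with
  | nil =>
    intro cur opps hne
    obtain ⟨c, cs, rfl⟩ := List.exists_cons_of_ne_nil hne
    simp [pvFin, pvSplitFirst, pvGroups, pv_dictOf_ne_nil]
  | cons t ts ih =>
    intro cur opps hne
    obtain ⟨c, cs, rfl⟩ := List.exists_cons_of_ne_nil hne
    have hcontE : (pvDictOf (c :: cs)).contains "agency"
        = (c :: cs).any (fun t => t.1 == "agency") := pv_contains_dictOf _ _
    cases h1 : (t.1 == "agency" || t.1 == "program") <;>
      cases h2 : (c :: cs).any (fun t => t.1 == "agency")
    -- (h1, h2) = (false, false): no flush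
    · have hstep : pvTokStep (opps, pvDictOf (c :: cs)) t
          = (opps, pvDictOf ((c :: cs) ++ [t])) := by
        rw [pv_dictOf_append]
        simp [pvTokStep, hcontE, h1, h2]
      have hseen : ((c :: cs) ++ [t]).any (fun t => t.1 == "agency") = (t.1 == "agency") := by
        rw [List.any_append, h2]; simp
      have hk : pvSplitFirst (t :: ts) false = pvSplitFirst ts (t.1 == "agency") + 1 :=
        pvSplitFirst_cons_false t ts
      rw [List.foldl_cons, hstep, ih ((c :: cs) ++ [t]) opps (by simp), hseen, hk]
      simp [List.take_succ_cons, List.drop_succ_cons]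
    -- (false, true): no flush (not an agency/program token)
    · have hstep : pvTokStep (opps, pvDictOf (c :: cs)) t
          = (opps, pvDictOf ((c :: cs) ++ [t])) := by
        rw [pv_dictOf_append]
        simp [pvTokStep, hcontE, h1, h2]
      have hseen : ((c :: cs) ++ [t]).any (fun t => t.1 == "agency") = true := by
        rw [List.any_append, h2]; simp
      have hk : pvSplitFirst (t :: ts) true = pvSplitFirst ts true + 1 := by
        simp [pvSplitFirst, h1, Nat.add_comm]
      rw [List.foldl_cons, hstep, ih ((c :: cs) ++ [t]) opps (by simp), hseen, hk]
      simp [List.take_succ_cons, List.drop_succ_cons]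
    -- (true, false): no flush (no agency in the current group yet)
    · have hstep : pvTokStep (opps, pvDictOf (c :: cs)) t
          = (opps, pvDictOf ((c :: cs) ++ [t])) := by
        rw [pv_dictOf_append]
        simp [pvTokStep, hcontE, h1, h2]
      have hseen : ((c :: cs) ++ [t]).any (fun t => t.1 == "agency") = (t.1 == "agency") := by
        rw [List.any_append, h2]; simp
      have hk : pvSplitFirst (t :: ts) false = pvSplitFirst ts (t.1 == "agency") + 1 :=
        pvSplitFirst_cons_false t ts
      rw [List.foldl_cons, hstep, ih ((c :: cs) ++ [t]) opps (by simp), hseen, hk]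
      simp [List.take_succ_cons, List.drop_succ_cons]
    -- (true, true): flush — close the current group and start a new one at t
    · have hcont : (pvDictOf (c :: cs)).contains "agency" = true := by rw [hcontE, h2]
      have hstep : pvTokStep (opps, pvDictOf (c :: cs)) t
          = (opps ++ [pvDictOf (c :: cs)], pvDictOf [t]) := by
        simp only [pvTokStep, h1, hcont, Bool.and_self, if_true]
        exact rfl
      have hk : pvSplitFirst (t :: ts) true = 0 := by
        simp [pvSplitFirst, h1]
      rw [List.foldl_cons, hstep, ih [t] (opps ++ [pvDictOf (c :: cs)]) (by simp), hk]
      simp [pv_groups_cons]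

-- the whole pipelines agree before the final [:8] slice
theorem pv_pipeline (tokens : List (String × String)) :
    pvFin (tokens.foldl pvTokStep ([], PySem.Dict.empty)) = (pvGroups tokens).map pvDictOf := by
  cases tokens with
  | nil => simp [pvFin, pvGroups, PySem.Dict.empty]
  | cons t ts =>
    have hstep : pvTokStep ([], PySem.Dict.empty) t = ([], pvDictOf [t]) := by
      simp [pvTokStep, pvDictOf]
    rw [List.foldl_cons, hstep, pv_main ts [t] [] (by simp), pv_groups_cons]
    simp

-- map commutes with the [:8] slice
theorem pv_map_slice {α β : Type} (f : α → β) (l : List α) :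
    (PySem.List.slice l none (some 8)).map f = PySem.List.slice (l.map f) none (some 8) := by
  rw [show (8 : Int) = ((8 : Nat) : Int) by norm_num,
    PySem.List.slice_to_natCast, PySem.List.slice_to_natCast, List.map_take]

-- ===== VERDICT (by name: the statement is the Claim_ definition above) =====
theorem parse_funding_py_spec : Claim_equal_parse_funding_py := by
  intro text _
  unfold Spec_parse_funding_py parse_funding_py parse_funding_py_alt
  have h := pv_pipeline (((PySem.Str.split? text "\n").getD []).filterMap pvClassify)
  simp only [pvFin] at h
  simp only [pv_fold_eq, h, pv_map_slice]
  simp only [List.map_map]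
  rfl
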